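-- pv_equiv track=rewrite | github.com/BrianMH/AoC-Attempts | 2021/Day10/SolnD10.py | processLeftoverStacks
-- ===== SOURCE A (Python) =====
-- def processLeftoverStacks(lStacks: list[list[str]], openCloseDict: dict[str, str], scoreDict: dict[str, int]) -> list[int]:
--     '''
--         Applies the algorithm given by AoC on a list of leftover autocorrect stacks
--         to extract their autocorrect scores.
--
--         Arguments:
--             lStacks - The collection of leftover stacks.
--             openCloseDict - The mapping between opening parenthesis values to their close values.
--             scoreDict - The mapping between expected closing parenthesis chars and their autocorrect
--                         score
--
--         Returns:
--             list - A list representing the collection of autocorrect scores, sorted from the largest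
--                    to smallest.
--     '''
--     curACScores = list()
--     for stack in lStacks:
--         curScore = 0
--         for elem in reversed(stack):
--             curScore = (curScore * 5) + scoreDict[openCloseDict[elem]]
--         curACScores.append(curScore)
--     return sorted(curACScores, reverse = True)
-- ===== SOURCE B (Python) =====
-- def processLeftoverStacks(lStacks: list[list[str]], openCloseDict: dict[str, str], scoreDict: dict[str, int]) -> list[int]:
--     # Online approach: compute each stack's score as a forward weighted sum
--     # (running place value instead of a reversed Horner accumulator), and keep
--     # the result list sorted descending at all times by insertion, so no final
--     # sort pass is needed.
--     result = []
--     for stack in lStacks: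
--         score, weight = 0, 1
--         for elem in stack:
--             score += scoreDict[openCloseDict[elem]] * weight
--             weight *= 5
--         pos = 0
--         while pos < len(result) and result[pos] >= score:
--             pos += 1
--         result.insert(pos, score)
--     return result
-- ===== Notes on version B (the rewrite author's own statement) =====
-- stated objective: alternative
-- what changed: Replaces the reversed-Horner accumulator plus final sorted(reverse=True) with an online algorithm: each stack is traversed forward keeping a running place value (score += lookup*weight; weight *= 5), and each score is inserted into an always-descending result list by scan-and-insert, so there is no final sort.
import Mathlib
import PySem

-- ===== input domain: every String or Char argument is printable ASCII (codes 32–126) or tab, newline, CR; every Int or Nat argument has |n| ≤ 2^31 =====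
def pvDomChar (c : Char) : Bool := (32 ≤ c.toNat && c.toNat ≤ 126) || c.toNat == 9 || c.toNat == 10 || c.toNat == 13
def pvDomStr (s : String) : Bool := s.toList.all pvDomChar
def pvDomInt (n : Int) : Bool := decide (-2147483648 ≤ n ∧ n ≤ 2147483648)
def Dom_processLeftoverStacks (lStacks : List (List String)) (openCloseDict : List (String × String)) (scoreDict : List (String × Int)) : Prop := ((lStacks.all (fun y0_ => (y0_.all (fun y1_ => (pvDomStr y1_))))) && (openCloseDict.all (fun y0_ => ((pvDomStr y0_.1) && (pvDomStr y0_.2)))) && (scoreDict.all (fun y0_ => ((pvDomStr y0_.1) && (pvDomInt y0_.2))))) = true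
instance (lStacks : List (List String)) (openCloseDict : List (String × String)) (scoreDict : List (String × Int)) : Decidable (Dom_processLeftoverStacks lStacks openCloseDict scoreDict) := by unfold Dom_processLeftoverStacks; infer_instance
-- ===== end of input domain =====

-- B is an online alternative of the same cost class: forward traversal with a running
-- place value instead of reversed Horner, and insertion into an always-descending list
-- instead of a final sort (objective: alternative).

-- ===== PORT A =====
-- A: for each stack, fold over reversed(stack) with curScore = curScore*5 + score; append; sorted desc.
def processLeftoverStacks (lStacks : List (List String)) (openCloseDict : List (String × String)) (scoreDict : List (String × Int)) : List Int :=
  let ocd := PySem.Dict.ofList openCloseDict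
  let sd := PySem.Dict.ofList scoreDict
  let curACScores := lStacks.foldl (fun acc stack =>
    acc ++ [stack.reverse.foldl (fun curScore elem =>
      curScore * 5 + ((sd.get? ((ocd.get? elem).getD "")).getD 0)) 0]) []
  PySem.List.sorted curACScores (fun x => x) true

-- ===== PORT B =====
-- B's scan-and-insert ('while pos < len(result) and result[pos] >= score' then insert):
-- ported as the equivalent structural recursion over the result list (exact: the new
-- score goes after every element ≥ it, before the first element < it).
def pvInsDesc (v : Int) : List Int → List Int
  | [] => [v]
  | h :: t => if h ≥ v then h :: pvInsDesc v t else v :: h :: t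

-- B: forward loop with (score, weight) state, online descending insertion, no final sort.
def processLeftoverStacks_alt (lStacks : List (List String)) (openCloseDict : List (String × String)) (scoreDict : List (String × Int)) : List Int :=
  let ocd := PySem.Dict.ofList openCloseDict
  let sd := PySem.Dict.ofList scoreDict
  lStacks.foldl (fun result stack =>
    pvInsDesc
      ((stack.foldl (fun p elem =>
        (p.1 + ((sd.get? ((ocd.get? elem).getD "")).getD 0) * p.2, p.2 * 5))
        ((0 : Int), (1 : Int))).1)
      result) []

-- ===== PRECONDITION & SPEC =====
-- Pre_ excludes exactly the inputs on which A raises KeyError: some stack element missing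
-- from openCloseDict, or its closing counterpart missing from scoreDict.
def Pre_processLeftoverStacks (lStacks : List (List String)) (openCloseDict : List (String × String)) (scoreDict : List (String × Int)) : Prop :=
  lStacks.all (fun stack => stack.all (fun elem =>
    match (PySem.Dict.ofList openCloseDict).get? elem with
    | some c => ((PySem.Dict.ofList scoreDict).get? c).isSome
    | none => false)) = true
instance (lStacks : List (List String)) (openCloseDict : List (String × String)) (scoreDict : List (String × Int)) : Decidable (Pre_processLeftoverStacks lStacks openCloseDict scoreDict) := by unfold Pre_processLeftoverStacks; infer_instance

def pvWitness_processLeftoverStacks : List (List String) × (List (String × String)) × (List (String × Int)) :=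
  ([["(", "["], ["{"], []], [("(", ")"), ("[", "]"), ("{", "}")], [(")", 1), ("]", 2), ("}", 3)])

def Spec_processLeftoverStacks (lStacks : List (List String)) (openCloseDict : List (String × String)) (scoreDict : List (String × Int)) (out : List Int) : Prop := out = processLeftoverStacks_alt lStacks openCloseDict scoreDict
instance (lStacks : List (List String)) (openCloseDict : List (String × String)) (scoreDict : List (String × Int)) (out : List Int) : Decidable (Spec_processLeftoverStacks lStacks openCloseDict scoreDict out) := by unfold Spec_processLeftoverStacks; infer_instance

-- ===== CLAIM =====
def Claim_equal_processLeftoverStacks : Prop := ∀ (lStacks : List (List String)) (openCloseDict : List (String × String)) (scoreDict : List (String × Int)), Dom_processLeftoverStacks lStacks openCloseDict scoreDict → Pre_processLeftoverStacks lStacks openCloseDict scoreDict → Spec_processLeftoverStacks lStacks openCloseDict scoreDict (processLeftoverStacks lStacks openCloseDict scoreDict)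

-- ===== LEMMAS AND PROOFS =====

-- membership in an insertion
lemma pv_mem_insDesc {x v : Int} {l : List Int} (h : x ∈ pvInsDesc v l) : x = v ∨ x ∈ l := by
  induction l with
  | nil => simpa [pvInsDesc] using h
  | cons a t ih =>
    by_cases hc : a ≥ v
    · simp only [pvInsDesc, if_pos hc, List.mem_cons] at h
      rcases h with h | h
      · exact Or.inr (by simp [h])
      · rcases ih h with h' | h'
        · exact Or.inl h'
        · exact Or.inr (List.mem_cons_of_mem _ h')
    · simp only [pvInsDesc, if_neg hc, List.mem_cons] at h
      exact h.imp id List.mem_cons.mpr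

-- insertion is a permutation-cons
lemma pv_insDesc_perm (v : Int) (l : List Int) : (pvInsDesc v l).Perm (v :: l) := by
  induction l with
  | nil => simp [pvInsDesc]
  | cons a t ih =>
    by_cases hc : a ≥ v
    · simp only [pvInsDesc, if_pos hc]
      exact ((ih.cons a).trans (List.Perm.swap v a t))
    · simp [pvInsDesc, if_neg hc]

-- insertion preserves descending order
lemma pv_insDesc_pairwise {v : Int} {l : List Int} (h : l.Pairwise (fun a b => b ≤ a)) :
    (pvInsDesc v l).Pairwise (fun a b => b ≤ a) := by
  induction l with
  | nil => simp [pvInsDesc]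
  | cons a t ih =>
    rcases List.pairwise_cons.mp h with ⟨ha, ht⟩
    by_cases hc : a ≥ v
    · simp only [pvInsDesc, if_pos hc]
      refine List.pairwise_cons.mpr ⟨?_, ih ht⟩
      intro x hx
      rcases pv_mem_insDesc hx with rfl | hx'
      · exact hc
      · exact ha x hx'
    · rw [not_le] at hc
      simp only [pvInsDesc, if_neg (not_le.mpr hc)]
      refine List.pairwise_cons.mpr ⟨?_, h⟩
      intro x hx
      rcases List.mem_cons.mp hx with rfl | hx'
      · exact le_of_lt hc
      · exact le_trans (ha x hx') (le_of_lt hc)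

-- the insertion fold is a permutation of the inserted values plus the accumulator
lemma pv_foldl_insDesc_perm (xs acc : List Int) :
    (xs.foldl (fun r v => pvInsDesc v r) acc).Perm (xs ++ acc) := by
  induction xs generalizing acc with
  | nil => simp
  | cons x t ih =>
    simp only [List.foldl_cons]
    refine (ih (pvInsDesc x acc)).trans ?_
    have h1 : (t ++ pvInsDesc x acc).Perm (t ++ (x :: acc)) :=
      List.Perm.append_left t (pv_insDesc_perm x acc)
    exact h1.trans List.perm_middle

-- the insertion fold is descending
lemma pv_foldl_insDesc_pairwise (xs : List Int) (acc : List Int)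
    (h : acc.Pairwise (fun a b => b ≤ a)) :
    (xs.foldl (fun r v => pvInsDesc v r) acc).Pairwise (fun a b => b ≤ a) := by
  induction xs generalizing acc with
  | nil => simpa
  | cons x t ih => exact ih _ (pv_insDesc_pairwise h)

-- forward weighted traversal from state (v, w) equals v + w * (reversed Horner value)
lemma pv_fwd_eq_horner (f : String → Int) (stack : List String) (v w : Int) :
    (stack.foldl (fun p elem => (p.1 + f elem * p.2, p.2 * 5)) (v, w)).1
      = v + w * stack.reverse.foldl (fun cur e => cur * 5 + f e) 0 := by
  induction stack generalizing v w with
  | nil => simp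
  | cons c t ih =>
    simp only [List.foldl_cons, List.reverse_cons, List.foldl_append, List.foldl_cons,
      List.foldl_nil]
    rw [ih]
    ring

-- two permutations of the same list that are both descending are equal
lemma pv_desc_unique {l₁ l₂ : List Int} (hp : l₁.Perm l₂)
    (h₁ : l₁.Pairwise (fun a b => b ≤ a)) (h₂ : l₂.Pairwise (fun a b => b ≤ a)) :
    l₁ = l₂ := by
  exact List.Perm.eq_of_pairwise (fun a b _ _ hab hba => le_antisymm hba hab) h₁ h₂ hp

-- ===== VERDICT =====
theorem processLeftoverStacks_spec : Claim_equal_processLeftoverStacks := by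
  intro lStacks openCloseDict scoreDict _ _
  unfold Spec_processLeftoverStacks processLeftoverStacks processLeftoverStacks_alt
  dsimp only
  rw [PySem.List.foldl_append_singleton_eq_map, List.nil_append]
  set f : String → Int := fun elem =>
    (((PySem.Dict.ofList scoreDict).get?
        (((PySem.Dict.ofList openCloseDict).get? elem).getD "")).getD 0) with hf
  -- B's per-stack forward value equals A's reversed-Horner value
  have hB : lStacks.foldl (fun result stack =>
      pvInsDesc ((stack.foldl (fun p elem => (p.1 + f elem * p.2, p.2 * 5)) (0, 1)).1)
        result) []
      = (lStacks.map (fun stack => stack.reverse.foldl (fun cur e => cur * 5 + f e) 0)).foldl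
          (fun r v => pvInsDesc v r) [] := by
    rw [List.foldl_map]
    refine List.foldl_ext _ _ _ ?_
    intro acc stack _
    rw [pv_fwd_eq_horner f stack 0 1, zero_add, one_mul]
  rw [hB]
  set scores := lStacks.map (fun stack => stack.reverse.foldl (fun cur e => cur * 5 + f e) 0)
  have hpf : (scores.foldl (fun r v => pvInsDesc v r) []).Perm scores := by
    simpa using pv_foldl_insDesc_perm scores []
  apply pv_desc_unique
  · exact (PySem.List.sorted_perm scores (fun x => x) true).trans hpf.symm
  · simpa using PySem.List.sorted_pairwise_rev (xs := scores) (key := fun x => x)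
  · exact pv_foldl_insDesc_pairwise scores [] (by simp)
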